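-- pv_equiv track=rewrite | github.com/bluck90/wordsearch | wordsearchnoclues_secondtry.py | upwards_strings
-- ===== SOURCE A (Python) =====
-- def upwards_strings(wordsearch):
--     strings = []
--     h = 0
--     for i in range(0, len(wordsearch[h])):
--         string = ''
--         for h in range(0, len(wordsearch)):
--             letter = wordsearch[h][i]
--             string = string + letter
--         strings.append(string)
--     return strings
-- ===== SOURCE B (Python) =====
-- def upwards_strings(wordsearch):
--     n = len(wordsearch[0])
--     cols = [[] for _ in range(n)]
--     for row in wordsearch:
--         for i, c in enumerate(cols):
--             c.append(row[i])
--     return [''.join(c) for c in cols]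
-- ===== Notes on version B (the rewrite author's own statement) =====
-- stated objective: alternative
-- what changed: Instead of A's column-by-column rescans of the whole grid (outer loop over column indices, inner loop over rows, building each column string by repeated concatenation), B makes a single row-major pass: it keeps one character-list accumulator per column, appends into all of them while walking the rows once, and joins each at the end.
import Mathlib
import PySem

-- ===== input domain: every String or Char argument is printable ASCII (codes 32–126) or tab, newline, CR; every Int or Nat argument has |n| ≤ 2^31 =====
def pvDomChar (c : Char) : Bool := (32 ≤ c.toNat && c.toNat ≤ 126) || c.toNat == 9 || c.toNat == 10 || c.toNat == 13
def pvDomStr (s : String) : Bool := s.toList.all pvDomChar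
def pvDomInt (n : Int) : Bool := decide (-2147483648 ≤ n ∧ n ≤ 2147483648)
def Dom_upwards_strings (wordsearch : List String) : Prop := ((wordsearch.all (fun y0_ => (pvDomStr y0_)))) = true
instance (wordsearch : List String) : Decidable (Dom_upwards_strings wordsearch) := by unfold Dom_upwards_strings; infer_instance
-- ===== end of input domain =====

-- B replaces A's column-by-column rescans (outer loop over columns, inner over rows) with a
-- single row-major pass that extends all per-column accumulators at once (objective: alternative).


-- ===== PORT A =====
-- column-by-column: for each column index i, rescan all rows collecting wordsearch[h][i]
def upwards_strings (wordsearch : List String) : List String :=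
  (PySem.List.pyRange 0 (((PySem.List.pyGet? wordsearch 0).getD "").toList.length : Int) 1).foldl
    (fun strings i =>
      let string :=
        (PySem.List.pyRange 0 (wordsearch.length : Int) 1).foldl
          (fun string h =>
            let letter := (PySem.Str.pyGet? (PySem.List.pyGetD wordsearch h "") i).getD ' '
            string ++ [letter]) ([] : List Char)
      strings ++ [String.ofList string]) []

-- ===== PORT B =====
-- single row-major pass: n simultaneous per-column accumulators, extended once per row
def upwards_strings_alt (wordsearch : List String) : List String :=
  let n := ((PySem.List.pyGet? wordsearch 0).getD "").toList.length
  let cols :=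
    wordsearch.foldl
      (fun cols row =>
        (PySem.List.enumerate cols).map
          (fun p => p.2 ++ [(PySem.Str.pyGet? row p.1).getD ' ']))
      (List.replicate n ([] : List Char))
  cols.map String.ofList

-- ===== PRECONDITION & SPEC =====
-- Pre_ excludes exactly the inputs where the Python A raises IndexError: the empty grid
-- (wordsearch[0]) and ragged grids with a row shorter than the first row (wordsearch[h][i]).
def Pre_upwards_strings (wordsearch : List String) : Prop :=
  wordsearch ≠ [] ∧ ∀ r ∈ wordsearch, (wordsearch.headD "").toList.length ≤ r.toList.length
instance (wordsearch : List String) : Decidable (Pre_upwards_strings wordsearch) := by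
  unfold Pre_upwards_strings; infer_instance
def pvWitness_upwards_strings : List String := ["ab", "cd", "ef"]

def Spec_upwards_strings (wordsearch : List String) (out : List String) : Prop := out = upwards_strings_alt wordsearch
instance (wordsearch : List String) (out : List String) : Decidable (Spec_upwards_strings wordsearch out) := by unfold Spec_upwards_strings; infer_instance

-- ===== CLAIM (what is proved, stated in full; the proofs are below) =====
def Claim_equal_upwards_strings : Prop := ∀ (wordsearch : List String), Dom_upwards_strings wordsearch → Pre_upwards_strings wordsearch → Spec_upwards_strings wordsearch (upwards_strings wordsearch)

-- ===== LEMMAS AND PROOFS =====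

-- the character A and B both select for row `row` at column `i`
def pvLetter (row : String) (i : Int) : Char := (PySem.Str.pyGet? row i).getD ' '

theorem pvWitness_ok :
    Dom_upwards_strings pvWitness_upwards_strings ∧ Pre_upwards_strings pvWitness_upwards_strings := by
  constructor <;> decide

theorem pyRange_zero_cast (n : Nat) :
    PySem.List.pyRange 0 (n : Int) 1 = (List.range n).map (fun (k : Nat) => (k : Int)) := by
  rw [PySem.List.pyRange_one]
  simp only [Int.sub_zero, Int.toNat_natCast]
  exact List.map_congr_left (fun k _ => by omega)

theorem A_eq (ws : List String) :
    upwards_strings ws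
    = (List.range (((PySem.List.pyGet? ws 0).getD "").toList.length)).map
        (fun (i : Nat) => String.ofList (ws.map (fun row => pvLetter row (i : Int)))) := by
  unfold upwards_strings
  rw [PySem.List.foldl_append_singleton_eq_map
        (f := fun i : Int => String.ofList
          ((PySem.List.pyRange 0 (ws.length : Int) 1).foldl
            (fun string h =>
              string ++ [(PySem.Str.pyGet? (PySem.List.pyGetD ws h "") i).getD ' ']) []))]
  simp only [List.nil_append]
  have hbody : ∀ i : Int,
      String.ofList
        ((PySem.List.pyRange 0 (ws.length : Int) 1).foldl
          (fun string h =>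
            string ++ [(PySem.Str.pyGet? (PySem.List.pyGetD ws h "") i).getD ' ']) [])
      = String.ofList (ws.map (fun row => pvLetter row i)) := by
    intro i
    rw [PySem.List.foldl_pyRange_zero_pyGetD' ws ""
          (fun string row => string ++ [(PySem.Str.pyGet? row i).getD ' ']) []]
    rw [PySem.List.foldl_append_singleton_eq_map
          (f := fun row => (PySem.Str.pyGet? row i).getD ' ')]
    simp [pvLetter]
  rw [List.map_congr_left (fun i _ => hbody i)]
  rw [pyRange_zero_cast, List.map_map]
  rfl

-- enumerate of (range n).map f is (range n).map (fun i => (i, f i))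
theorem enumerate_range_map {α : Type} (f : Nat → α) (n : Nat) :
    PySem.List.enumerate ((List.range n).map f)
    = (List.range n).map (fun (i : Nat) => ((i : Int), f i)) := by
  induction n with
  | zero => simp [PySem.List.enumerate_nil]
  | succ m ih =>
    rw [List.range_succ, List.map_append, List.map_append,
        PySem.List.enumerate_append, ih]
    simp [PySem.List.enumerate_cons, PySem.List.enumerate_nil]

-- one B step on a canonical accumulator
theorem step_eq (n : Nat) (f : Nat → List Char) (row : String) :
    (PySem.List.enumerate ((List.range n).map f)).map
        (fun p => p.2 ++ [(PySem.Str.pyGet? row p.1).getD ' '])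
    = (List.range n).map (fun i => f i ++ [pvLetter row (i : Int)]) := by
  rw [enumerate_range_map, List.map_map]
  exact List.map_congr_left (fun i _ => by simp [pvLetter])

-- the whole B fold on a canonical accumulator
theorem fold_eq (n : Nat) :
    ∀ (rows : List String) (f : Nat → List Char),
      rows.foldl
        (fun cols row =>
          (PySem.List.enumerate cols).map
            (fun p => p.2 ++ [(PySem.Str.pyGet? row p.1).getD ' ']))
        ((List.range n).map f)
      = (List.range n).map (fun i => f i ++ rows.map (fun row => pvLetter row (i : Int))) := by
  intro rows
  induction rows with
  | nil => intro f; simp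
  | cons row t ih =>
    intro f
    rw [List.foldl_cons, step_eq n f row, ih (fun i => f i ++ [pvLetter row (i : Int)])]
    exact List.map_congr_left (fun i _ => by simp)

theorem B_eq (ws : List String) :
    upwards_strings_alt ws
    = (List.range (((PySem.List.pyGet? ws 0).getD "").toList.length)).map
        (fun (i : Nat) => String.ofList (ws.map (fun row => pvLetter row (i : Int)))) := by
  simp only [upwards_strings_alt]
  have hrepl : List.replicate (((PySem.List.pyGet? ws 0).getD "").toList.length) ([] : List Char)
      = (List.range (((PySem.List.pyGet? ws 0).getD "").toList.length)).map (fun _ => ([] : List Char)) := by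
    simp [List.map_const']
  rw [hrepl, fold_eq _ ws (fun _ => ([] : List Char)), List.map_map]
  simp

-- ===== VERDICT (by name: the statement is the Claim_ definition above) =====
theorem upwards_strings_spec : Claim_equal_upwards_strings := by
  intro ws _ _
  unfold Spec_upwards_strings
  rw [A_eq, B_eq]
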